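-- pv_equiv track=rewrite | github.com/Arron-chenzm/common_test_new | analysis/bg1_analysis5.py | get_ciji
-- ===== SOURCE A (Python) =====
-- def get_ciji(str):
--     ciji = ''
--     length = len(str)
--     for i in range(length-2,0,-1):
--         if str[i]!= ' ':
--             ciji= str[i]+ciji
--         else:
--             break
--     return ciji
-- ===== SOURCE B (Python) =====
-- def get_ciji(str):
--     return str[1:-1].split(' ')[-1]
-- ===== Notes on version B (the rewrite author's own statement) =====
-- stated objective: faster
-- what changed: Replaces the backward character-by-character scan with break (which rebuilds the accumulator string by prepending at every step) by slicing the interior once, tokenizing it with a single-space split, and returning the last token.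
import Mathlib
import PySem

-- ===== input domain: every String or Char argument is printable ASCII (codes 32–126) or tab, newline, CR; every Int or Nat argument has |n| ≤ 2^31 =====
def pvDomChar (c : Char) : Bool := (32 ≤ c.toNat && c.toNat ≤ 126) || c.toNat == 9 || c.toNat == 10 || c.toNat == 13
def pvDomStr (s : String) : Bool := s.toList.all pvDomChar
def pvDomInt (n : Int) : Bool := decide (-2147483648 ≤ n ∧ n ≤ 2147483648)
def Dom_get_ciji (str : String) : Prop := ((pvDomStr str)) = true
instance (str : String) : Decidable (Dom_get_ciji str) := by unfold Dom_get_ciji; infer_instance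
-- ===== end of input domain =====

-- B slices the interior str[1:-1] once and returns the last token of a single-space split,
-- replacing A's backward scan whose per-step string prepending is quadratic; objective: faster (measured).

-- ===== PORT A =====
-- the loop body: walk the countdown index list, prepending non-space chars, break at a space
def get_ciji_go (s : List Char) (idxs : List Int) (ciji : List Char) : List Char :=
  match idxs with
  | [] => ciji
  | i :: rest =>
    match PySem.List.pyGet? s i with
    | some c => if c ≠ ' ' then get_ciji_go s rest (c :: ciji) else ciji
    | none => ciji  -- unreachable: every i ∈ range(len-2, 0, -1) is in range

def get_ciji (str : String) : String :=
  let length : Int := PySem.Str.len str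
  String.ofList (get_ciji_go str.toList (PySem.List.pyRange (length - 2) 0 (-1)) [])

-- ===== PORT B =====
def get_ciji_alt (str : String) : String :=
  let mid := PySem.List.slice str.toList (some 1) (some (-1))   -- str[1:-1]
  let parts := PySem.Chars.splitOn mid [' ']                    -- .split(' ')
  match PySem.List.pyGet? parts (-1) with                       -- [-1]
  | some w => String.ofList w
  | none => ""  -- unreachable: split(' ') always returns a nonempty list

-- ===== PRECONDITION & SPEC =====
def Spec_get_ciji (str : String) (out : String) : Prop := out = get_ciji_alt str
instance (str : String) (out : String) : Decidable (Spec_get_ciji str out) := by unfold Spec_get_ciji; infer_instance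

-- ===== CLAIM (what is proved, stated in full; the proofs are below) =====
def Claim_equal_get_ciji : Prop := ∀ (str : String), Dom_get_ciji str → Spec_get_ciji str (get_ciji str)

-- ===== LEMMAS AND PROOFS =====

-- the segment after the last space, scanned forward with a restart at each space (mirrors split's last chunk)
def pvLastPart (l : List Char) (cur : List Char) : List Char :=
  match l with
  | [] => cur.reverse
  | c :: rest => if c = ' ' then pvLastPart rest [] else pvLastPart rest (c :: cur)

-- the same segment, scanned backward until the first space (mirrors A's loop)
def pvRscan (r : List Char) (acc : List Char) : List Char :=
  match r with
  | [] => acc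
  | c :: rest => if c ≠ ' ' then pvRscan rest (c :: acc) else acc

lemma pvRscan_acc (r : List Char) (acc : List Char) :
    pvRscan r acc = pvRscan r [] ++ acc := by
  induction r generalizing acc with
  | nil => simp [pvRscan]
  | cons c rest ih =>
    by_cases h : c = ' '
    · simp [pvRscan, h]
    · simp only [pvRscan, h, ne_eq, not_false_iff, if_pos]
      rw [ih, ih [c]]
      simp

lemma pvLastPart_append (m : List Char) (c : Char) (cur : List Char) :
    pvLastPart (m ++ [c]) cur = if c = ' ' then [] else pvLastPart m cur ++ [c] := by
  induction m generalizing cur with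
  | nil => by_cases h : c = ' ' <;> simp [pvLastPart, h]
  | cons d m' ih =>
    by_cases hd : d = ' '
    · simp [pvLastPart, hd, ih]
    · simp [pvLastPart, hd, ih]

lemma pvRscan_eq_lastPart (l : List Char) :
    pvRscan l.reverse [] = pvLastPart l [] := by
  induction l using List.reverseRecOn with
  | nil => simp [pvRscan, pvLastPart]
  | append_singleton m c ih =>
    rw [pvLastPart_append]
    by_cases h : c = ' '
    · simp [pvRscan, h]
    · simp only [List.reverse_append, List.reverse_singleton, List.singleton_append,
        pvRscan, ne_eq, h, not_false_iff, if_pos]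
      rw [pvRscan_acc, ih]
      simp

-- A's loop over range(k, 0, -1) reads the elements of (s.drop 1).take k from right to left
lemma get_ciji_go_spec (s : List Char) (k : Nat) (hk : k + 1 ≤ s.length) (acc : List Char) :
    get_ciji_go s (PySem.List.pyRange (k : Int) 0 (-1)) acc
      = pvRscan ((s.drop 1).take k).reverse acc := by
  induction k generalizing acc with
  | zero => simp [PySem.List.pyRange_neg_one_eq_nil, get_ciji_go, pvRscan]
  | succ k ih =>
    have hidx : k + 1 < s.length := by omega
    have hget : PySem.List.pyGet? s ((k : Int) + 1) = some s[k + 1] := by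
      have h0 : (0 : Int) ≤ (k : Int) + 1 := by positivity
      have h1 : (k : Int) + 1 < (s.length : Int) := by exact_mod_cast hidx
      simp only [PySem.List.pyGet?, PySem.List.pyIdx?]
      rw [if_pos h0, if_pos h1, show ((k : Int) + 1).toNat = k + 1 by omega]
      simp [hidx]
    have htake : (s.drop 1).take (k + 1) = (s.drop 1).take k ++ [s[k + 1]] := by
      rw [List.take_add_one]
      congr 1
      have : (s.drop 1)[k]? = some s[k + 1] := by
        rw [List.getElem?_drop]
        simp [show 1 + k = k + 1 by omega, hidx]
      simp [this]
    rw [show ((k + 1 : Nat) : Int) = (k : Int) + 1 by push_cast; ring,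
      PySem.List.pyRange_neg_one_cons (by positivity)]
    simp only [get_ciji_go, hget]
    rw [show (k : Int) + 1 - 1 = (k : Int) by ring]
    by_cases hc : s[k + 1] = ' '
    · rw [if_neg (by simp [hc]), htake]
      simp [pvRscan, hc]
    · rw [if_pos (by simp [hc]), ih (by omega), htake]
      simp [pvRscan, hc]

-- the last element of split(' ') is pvLastPart
lemma splitOn_go_last (fuel : Nat) (l cur : List Char) (accs : List (List Char))
    (h : l.length ≤ fuel) :
    ∃ pre, PySem.Chars.splitOn.go [' '] fuel l cur accs = pre ++ [pvLastPart l cur] := by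
  induction fuel generalizing l cur accs with
  | zero =>
    have hl : l = [] := by simpa using List.length_eq_zero_iff.mp (by omega)
    subst hl
    exact ⟨accs.reverse, by simp [PySem.Chars.splitOn.go, pvLastPart]⟩
  | succ fuel ih =>
    match l with
    | [] => exact ⟨accs.reverse, by simp [PySem.Chars.splitOn.go, pvLastPart]⟩
    | c :: rest =>
      by_cases hc : c = ' '
      · obtain ⟨pre, hpre⟩ := ih rest [] (cur.reverse :: accs) (by simp at h; omega)
        refine ⟨pre, ?_⟩
        rw [PySem.Chars.splitOn.go]
        simp [List.isPrefixOf, hc, hpre, pvLastPart]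
      · obtain ⟨pre, hpre⟩ := ih rest (c :: cur) accs (by simp at h; omega)
        refine ⟨pre, ?_⟩
        rw [PySem.Chars.splitOn.go]
        simp [List.isPrefixOf, hc, Ne.symm hc, hpre, pvLastPart]

lemma pyGet?_append_singleton {α : Type} (xs : List α) (x : α) :
    PySem.List.pyGet? (xs ++ [x]) (-1) = some x := by
  simp [PySem.List.pyGet?, PySem.List.pyIdx?]

lemma splitOn_last (l : List Char) :
    PySem.List.pyGet? (PySem.Chars.splitOn l [' ']) (-1) = some (pvLastPart l []) := by
  obtain ⟨pre, hpre⟩ := splitOn_go_last (l.length + 1) l [] [] (by omega)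
  rw [PySem.Chars.splitOn, hpre, pyGet?_append_singleton]

lemma interior_eq (t : List Char) :
    PySem.List.slice t (some 1) (some (-1)) = (t.drop 1).take (t.length - 2) := by
  rcases t with _ | ⟨c, r⟩
  · rfl
  · have h1 : PySem.List.clampIdx (c :: r).length 1 = 1 := by
      simp only [PySem.List.clampIdx, List.length_cons]
      split_ifs <;> omega
    have h2 : PySem.List.clampIdx (c :: r).length (-1) = r.length := by
      simp only [PySem.List.clampIdx, List.length_cons]
      split_ifs <;> omega
    show List.take
        (PySem.List.clampIdx (c :: r).length (-1) - PySem.List.clampIdx (c :: r).length 1)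
        (List.drop (PySem.List.clampIdx (c :: r).length 1) (c :: r)) = _
    rw [h1, h2, show r.length - 1 = (c :: r).length - 2 by
      simp only [List.length_cons]; omega]

-- ===== VERDICT (by name: the statement is the Claim_ definition above) =====
theorem get_ciji_spec : Claim_equal_get_ciji := by
  intro s _
  unfold Spec_get_ciji get_ciji get_ciji_alt
  dsimp only
  rw [interior_eq, splitOn_last]
  dsimp only
  have hlen : PySem.Str.len s = (s.toList.length : Int) := by
    simp [PySem.Str.len_eq]
  rw [hlen]
  by_cases h : s.toList.length ≤ 2
  · rw [PySem.List.pyRange_neg_one_eq_nil (by omega),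
      show s.toList.length - 2 = 0 by omega]
    simp [get_ciji_go, pvLastPart]
  · rw [show (s.toList.length : Int) - 2 = ((s.toList.length - 2 : Nat) : Int) by omega,
      get_ciji_go_spec s.toList (s.toList.length - 2) (by omega), pvRscan_eq_lastPart]
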